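-- pv_equiv track=rewrite | github.com/pypi-data/pypi-mirror-399 | packages/ATaRVa/atarva-0.5.0.tar.gz/atarva-0.5.0/ATARVA/locus_utils.py | subset_hiQ_reads
-- ===== SOURCE A (Python) =====
-- def subset_hiQ_reads(global_read_variations, maxR, read_indices, read_tag):
--     # coverage of the locus is high
--     read_qual_dict = {} # dict to store read quality
--     for each_read_id in read_indices:
--         read_qual_dict[each_read_id] = global_read_variations[each_read_id]['q']
--     sorted_reads_by_qual = [read_id for read_id,_ in sorted(read_qual_dict.items(), key = lambda x: x[1], reverse = True)] # sorting reads, based on quality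
--     tmp_read_indices = set(sorted_reads_by_qual[:maxR])
--     good_qual_read_idx = [idx for idx,i in enumerate(read_indices) if i in tmp_read_indices] # getting the index of the good_qual read-ids
--     read_tag = [read_tag[i] for i in good_qual_read_idx] # extracting hp-tags of good-qual reads
--     read_indices = sorted(tmp_read_indices)
--     del tmp_read_indices, good_qual_read_idx
--
--     return read_indices, read_tag
-- ===== SOURCE B (Python) =====
-- def subset_hiQ_reads(global_read_variations, maxR, read_indices, read_tag):
--     # One pass with a bounded top-k buffer instead of building a quality dict
--     # and fully sorting it: keep at most k (quality, read_id) pairs, quality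
--     # descending, earlier-seen read first on ties.
--     k = maxR if maxR > 0 else 0
--     seen = set()
--     best = []  # at most k pairs (quality, read_id), quality descending
--     for r in read_indices:
--         if r in seen:
--             continue
--         seen.add(r)
--         q = global_read_variations[r]['q']
--         if len(best) < k or (best and q > best[-1][0]):
--             j = 0
--             while j < len(best) and best[j][0] >= q:
--                 j += 1
--             best.insert(j, (q, r))
--             if len(best) > k:
--                 best.pop()
--     chosen = {r for _, r in best}
--     tags = [t for r, t in zip(read_indices, read_tag) if r in chosen]
--     return sorted(chosen), tags
-- ===== Notes on version B (the rewrite author's own statement) =====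
-- stated objective: alternative
-- what changed: B replaces A's build-a-quality-dict + full stable descending sort + slice with a single pass over read_indices maintaining a bounded insertion-sorted buffer of at most maxR (quality, id) pairs, and collapses A's two downstream passes (collect positions via enumerate, then index read_tag) into one zip-filter pass.
-- intended difference: For negative maxR (a nonsensical read cap) with more than |maxR| distinct read ids, A's slice [:maxR] accidentally keeps all but the last |maxR| quality-sorted reads, while B selects nothing (an empty cap selects no reads), which is the intended meaning of a non-positive cap. — e.g. on subset_hiQ_reads([(0, [("q", 5)]), (1, [("q", 7)])], -1, [0, 1], ["a", "b"]): A returns ([1], ["b"]), B returns ([], [])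
-- outside the precondition, e.g. on subset_hiQ_reads({0: {'q': 5}, 1: {'q': 7}}, 1, [1, 0], ['a']): A returns ([1], ['a']), B returns ([1], ['a'])
import Mathlib
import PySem

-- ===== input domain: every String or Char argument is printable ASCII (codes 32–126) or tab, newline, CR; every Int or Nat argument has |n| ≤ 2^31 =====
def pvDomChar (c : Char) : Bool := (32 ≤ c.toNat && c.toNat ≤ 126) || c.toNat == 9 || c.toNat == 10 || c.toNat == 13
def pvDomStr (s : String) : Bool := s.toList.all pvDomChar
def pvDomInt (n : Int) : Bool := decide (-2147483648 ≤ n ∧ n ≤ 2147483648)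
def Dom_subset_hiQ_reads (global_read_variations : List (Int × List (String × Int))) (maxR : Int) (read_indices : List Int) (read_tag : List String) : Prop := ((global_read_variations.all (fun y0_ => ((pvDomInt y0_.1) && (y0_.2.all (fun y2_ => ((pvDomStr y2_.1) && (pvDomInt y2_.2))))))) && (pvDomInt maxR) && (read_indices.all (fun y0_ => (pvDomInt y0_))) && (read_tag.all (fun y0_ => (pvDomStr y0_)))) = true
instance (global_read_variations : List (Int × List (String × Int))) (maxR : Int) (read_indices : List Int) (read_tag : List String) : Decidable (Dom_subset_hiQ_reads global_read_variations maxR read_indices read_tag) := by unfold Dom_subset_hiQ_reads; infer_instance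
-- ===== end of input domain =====

-- B is an alternative algorithm: instead of building a quality dict and fully sorting it, one pass
-- over read_indices keeps a bounded insertion-sorted buffer of at most maxR (quality, id) pairs,
-- and A's two downstream passes (enumerate-filter, then index read_tag) collapse into one
-- zip-filter pass; return values proved identical on Pre_ outside D_ (non-positive cap corner).

-- global_read_variations[r]['q'] (both Pythons contain this same lookup expression)
def pvQual (g : List (Int × List (String × Int))) (r : Int) : Int :=
  (PySem.Dict.get? (PySem.Dict.mk ((PySem.Dict.get? (PySem.Dict.mk g) r).getD [])) "q").getD 0

-- ===== PORT A =====
def subset_hiQ_reads (global_read_variations : List (Int × List (String × Int))) (maxR : Int) (read_indices : List Int) (read_tag : List String) : List Int × List String :=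
  -- read_qual_dict = {}; for each_read_id in read_indices: read_qual_dict[each_read_id] = …['q']
  let read_qual_dict : PySem.Dict Int Int :=
    read_indices.foldl (fun d r => d.insert r (pvQual global_read_variations r)) (PySem.Dict.mk [])
  -- sorted(read_qual_dict.items(), key=lambda x: x[1], reverse=True), then take the ids
  let sorted_reads_by_qual : List Int :=
    (PySem.List.sorted read_qual_dict.items (fun p => p.2) true).map (fun p => p.1)
  -- set(sorted_reads_by_qual[:maxR])
  let tmp_read_indices : PySem.Set Int :=
    PySem.Set.ofList (PySem.List.slice sorted_reads_by_qual none (some maxR))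
  -- [idx for idx,i in enumerate(read_indices) if i in tmp_read_indices]
  let good_qual_read_idx : List Int :=
    ((PySem.List.enumerate read_indices 0).filter (fun p => PySem.Set.contains tmp_read_indices p.2)).map (fun p => p.1)
  -- [read_tag[i] for i in good_qual_read_idx]  (in-range on Pre_)
  let read_tag2 : List String := good_qual_read_idx.map (fun i => PySem.List.pyGetD read_tag i "")
  -- sorted(tmp_read_indices)  (no key: independent of set iteration order)
  let read_indices2 : List Int := PySem.List.sorted tmp_read_indices (fun x => x) false
  (read_indices2, read_tag2)

-- ===== PORT B =====
-- the while-loop + insert of Source B: scan left while best[j][0] >= q, insert (q, r) there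
def pvIns (x : Int × Int) : List (Int × Int) → List (Int × Int)
  | [] => [x]
  | y :: ys => if y.1 ≥ x.1 then y :: pvIns x ys else x :: y :: ys

-- one iteration of Source B's for-loop body over the state (seen, best); best[-1] = getLast? on a
-- nonempty list (the `best and` guard), best.pop() = dropLast, seen.add(r) happens either way
def pvStepB (g : List (Int × List (String × Int))) (k : Int)
    (st : PySem.Set Int × List (Int × Int)) (r : Int) : PySem.Set Int × List (Int × Int) :=
  if PySem.Set.contains st.1 r then st
  else if decide ((st.2.length : Int) < k) ||
      (!st.2.isEmpty && decide ((st.2.getLast?.getD (0, 0)).1 < pvQual g r)) then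
    (PySem.Set.add st.1 r,
      if decide (k < ((pvIns (pvQual g r, r) st.2).length : Int)) then
        (pvIns (pvQual g r, r) st.2).dropLast
      else pvIns (pvQual g r, r) st.2)
  else (PySem.Set.add st.1 r, st.2)

def subset_hiQ_reads_alt (global_read_variations : List (Int × List (String × Int))) (maxR : Int) (read_indices : List Int) (read_tag : List String) : List Int × List String :=
  -- k = maxR if maxR > 0 else 0
  let k : Int := if 0 < maxR then maxR else 0
  -- seen = set(); best = []; for r in read_indices: …
  let st := read_indices.foldl (pvStepB global_read_variations k) (PySem.Set.empty, [])
  -- chosen = {r for _, r in best}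
  let chosen : PySem.Set Int := PySem.Set.ofList (st.2.map (fun p => p.2))
  -- [t for r, t in zip(read_indices, read_tag) if r in chosen]
  let tags : List String :=
    ((read_indices.zip read_tag).filter (fun p => PySem.Set.contains chosen p.1)).map (fun p => p.2)
  (PySem.List.sorted chosen (fun x => x) false, tags)

-- ===== PRECONDITION & SPEC =====
-- Pre_ excludes (a) inputs where a read id has no 'q' entry (A raises KeyError) and (b) read_tag
-- shorter than read_indices: tags are parallel to indices, and a shorter read_tag makes A raise
-- IndexError whenever a selected read sits at an out-of-range position (A still returns on some
-- such inputs — whenever every selected position is in range — see the cite).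
def Pre_subset_hiQ_reads (global_read_variations : List (Int × List (String × Int))) (maxR : Int) (read_indices : List Int) (read_tag : List String) : Prop :=
  (read_indices.all (fun r =>
      match PySem.Dict.get? (PySem.Dict.mk global_read_variations) r with
      | some d => (PySem.Dict.get? (PySem.Dict.mk d) "q").isSome
      | none => false) = true)
  ∧ read_indices.length ≤ read_tag.length
instance (global_read_variations : List (Int × List (String × Int))) (maxR : Int) (read_indices : List Int) (read_tag : List String) : Decidable (Pre_subset_hiQ_reads global_read_variations maxR read_indices read_tag) := by unfold Pre_subset_hiQ_reads; infer_instance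

def pvWitness_subset_hiQ_reads : (List (Int × List (String × Int))) × Int × List Int × List String :=
  ([(0, [("q", 5)]), (1, [("q", 7)])], 1, [0, 1], ["a", "b"])

-- For negative maxR (a nonsensical read cap) with more than |maxR| distinct read ids, A's slice
-- [:maxR] accidentally keeps all but the last |maxR| quality-sorted reads, while B selects nothing
-- (an empty cap selects no reads), which is the intended meaning of a non-positive cap.
def D_subset_hiQ_reads (global_read_variations : List (Int × List (String × Int))) (maxR : Int) (read_indices : List Int) (read_tag : List String) : Prop :=
  maxR < 0 ∧ -maxR < ((PySem.Set.ofList read_indices).length : Int)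
instance (global_read_variations : List (Int × List (String × Int))) (maxR : Int) (read_indices : List Int) (read_tag : List String) : Decidable (D_subset_hiQ_reads global_read_variations maxR read_indices read_tag) := by unfold D_subset_hiQ_reads; infer_instance

def Spec_subset_hiQ_reads (global_read_variations : List (Int × List (String × Int))) (maxR : Int) (read_indices : List Int) (read_tag : List String) (out : List Int × List String) : Prop := ¬ D_subset_hiQ_reads global_read_variations maxR read_indices read_tag → out = subset_hiQ_reads_alt global_read_variations maxR read_indices read_tag
instance (global_read_variations : List (Int × List (String × Int))) (maxR : Int) (read_indices : List Int) (read_tag : List String) (out : List Int × List String) : Decidable (Spec_subset_hiQ_reads global_read_variations maxR read_indices read_tag out) := by unfold Spec_subset_hiQ_reads; infer_instance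

def pvDiffWitness_subset_hiQ_reads : (List (Int × List (String × Int))) × Int × List Int × List String :=
  ([(0, [("q", 5)]), (1, [("q", 7)])], -1, [0, 1], ["a", "b"])
def pvDiffWitnessOut_subset_hiQ_reads : (List Int × List String) × (List Int × List String) :=
  (([1], ["b"]), ([], []))

-- ===== CLAIM (what is proved, stated in full; the proofs are below) =====
def Claim_unchanged_subset_hiQ_reads : Prop := ∀ (global_read_variations : List (Int × List (String × Int))) (maxR : Int) (read_indices : List Int) (read_tag : List String), Dom_subset_hiQ_reads global_read_variations maxR read_indices read_tag → Pre_subset_hiQ_reads global_read_variations maxR read_indices read_tag → Spec_subset_hiQ_reads global_read_variations maxR read_indices read_tag (subset_hiQ_reads global_read_variations maxR read_indices read_tag)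
def Claim_changed_subset_hiQ_reads : Prop := Dom_subset_hiQ_reads (pvDiffWitness_subset_hiQ_reads.1) (pvDiffWitness_subset_hiQ_reads.2.1) (pvDiffWitness_subset_hiQ_reads.2.2.1) (pvDiffWitness_subset_hiQ_reads.2.2.2) ∧ Pre_subset_hiQ_reads (pvDiffWitness_subset_hiQ_reads.1) (pvDiffWitness_subset_hiQ_reads.2.1) (pvDiffWitness_subset_hiQ_reads.2.2.1) (pvDiffWitness_subset_hiQ_reads.2.2.2) ∧ D_subset_hiQ_reads (pvDiffWitness_subset_hiQ_reads.1) (pvDiffWitness_subset_hiQ_reads.2.1) (pvDiffWitness_subset_hiQ_reads.2.2.1) (pvDiffWitness_subset_hiQ_reads.2.2.2) ∧ subset_hiQ_reads (pvDiffWitness_subset_hiQ_reads.1) (pvDiffWitness_subset_hiQ_reads.2.1) (pvDiffWitness_subset_hiQ_reads.2.2.1) (pvDiffWitness_subset_hiQ_reads.2.2.2) = pvDiffWitnessOut_subset_hiQ_reads.1 ∧ subset_hiQ_reads_alt (pvDiffWitness_subset_hiQ_reads.1) (pvDiffWitness_subset_hiQ_reads.2.1) (pvDiffWitness_subset_hiQ_reads.2.2.1)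 (pvDiffWitness_subset_hiQ_reads.2.2.2) = pvDiffWitnessOut_subset_hiQ_reads.2 ∧ pvDiffWitnessOut_subset_hiQ_reads.1 ≠ pvDiffWitnessOut_subset_hiQ_reads.2
def Claim_exact_subset_hiQ_reads : Prop := ∀ (global_read_variations : List (Int × List (String × Int))) (maxR : Int) (read_indices : List Int) (read_tag : List String), Dom_subset_hiQ_reads global_read_variations maxR read_indices read_tag → Pre_subset_hiQ_reads global_read_variations maxR read_indices read_tag → D_subset_hiQ_reads global_read_variations maxR read_indices read_tag → subset_hiQ_reads global_read_variations maxR read_indices read_tag ≠ subset_hiQ_reads_alt global_read_variations maxR read_indices read_tag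

-- ===== LEMMAS AND PROOFS =====

-- ---- A-side: the dict-building loop is ordered dedup decorated with qualities ----

theorem pv_insert_map (g : List (Int × List (String × Int))) (S : List Int) (r : Int) :
    PySem.Dict.insert (PySem.Dict.mk (S.map (fun s => (s, pvQual g s)))) r (pvQual g r)
      = PySem.Dict.mk ((PySem.Set.add S r).map (fun s => (s, pvQual g s))) := by
  by_cases hr : r ∈ S
  · simp [PySem.Dict.insert, PySem.Dict.contains, hr]
    exact fun a _ h => by subst h; exact ⟨rfl, rfl⟩
  · simp [PySem.Dict.insert, PySem.Dict.contains, hr]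

theorem pv_foldl_insert (g : List (Int × List (String × Int))) :
    ∀ (xs S : List Int),
    xs.foldl (fun d r => PySem.Dict.insert d r (pvQual g r)) (PySem.Dict.mk (S.map (fun s => (s, pvQual g s))))
      = PySem.Dict.mk ((xs.foldl PySem.Set.add S).map (fun s => (s, pvQual g s))) := by
  intro xs
  induction xs with
  | nil => intro S; rfl
  | cons x xs ih => intro S; simp only [List.foldl_cons, pv_insert_map, ih]

-- ---- stable reverse sort commutes with decoration ----

theorem pv_insertBy_map {α β : Type} (bf : β → β → Bool) (bg : α → α → Bool) (f : α → β)
    (h : ∀ a b, bf (f a) (f b) = bg a b) (x : α) :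
    ∀ ys : List α, PySem.List.insertBy bf (f x) (ys.map f) = (PySem.List.insertBy bg x ys).map f := by
  intro ys
  induction ys with
  | nil => rfl
  | cons y ys ih => simp [PySem.List.insertBy, h, ih]; split_ifs <;> simp

theorem pv_foldl_insertBy_map {α β : Type} (bf : β → β → Bool) (bg : α → α → Bool) (f : α → β)
    (h : ∀ a b, bf (f a) (f b) = bg a b) :
    ∀ (xs acc : List α),
      xs.foldl (fun acc x => PySem.List.insertBy bf (f x) acc) (acc.map f)
        = (xs.foldl (fun acc x => PySem.List.insertBy bg x acc) acc).map f := by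
  intro xs
  induction xs with
  | nil => intro acc; rfl
  | cons x xs ih => intro acc; simp only [List.foldl_cons, pv_insertBy_map bf bg f h x acc, ← ih]

theorem pv_sorted_map {α β : Type} (xs : List α) (f : α → β) (key : β → Int) :
    PySem.List.sorted (xs.map f) key true
      = (PySem.List.sorted xs (fun a => key (f a)) true).map f := by
  rw [PySem.List.sorted_rev_eq_foldl_insertBy, PySem.List.sorted_rev_eq_foldl_insertBy, List.foldl_map]
  exact pv_foldl_insertBy_map _ _ f (fun a b => rfl) xs []

-- ---- A's index-collection pass + read_tag[i] extraction = B's single zip-filter pass ----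

theorem pv_tags (c : Int → Bool) : ∀ (ri : List Int) (rt : List String) (s : Nat),
    ri.length + s ≤ rt.length →
    ((PySem.List.enumerate ri (s : Int)).filter (fun p => c p.2)).map (fun p => PySem.List.pyGetD rt p.1 "")
      = ((ri.zip (rt.drop s)).filter (fun p => c p.1)).map (fun p => p.2) := by
  intro ri
  induction ri with
  | nil => intro rt s h; simp [PySem.List.enumerate_nil]
  | cons r ri ih =>
    intro rt s h
    have hs : s < rt.length := by simp at h; omega
    have h3 : ri.length + (s + 1) ≤ rt.length := by simp at h ⊢; omega
    have h2 : ((s : Int) + 1) = ((s + 1 : Nat) : Int) := by push_cast; ring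
    rw [List.drop_eq_getElem_cons hs, PySem.List.enumerate_cons, h2]
    rw [List.filter_cons, List.zip_cons_cons, List.filter_cons]
    by_cases hc : c r = true
    · simp only [hc, if_pos, List.map_cons, ih rt (s+1) h3]
      simp [PySem.List.pyGetD_natCast, List.getElem?_eq_getElem hs]
    · simp only [hc, if_neg, Bool.false_eq_true, not_false_iff, ih rt (s+1) h3]

-- ---- B-side: the bounded buffer is the take-k prefix of the stable descending sort ----

def pvPair (g : List (Int × List (String × Int))) (s : Int) : Int × Int := (pvQual g s, s)

-- the full stable descending sort of the decorated distinct ids seen so far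
def pvSortedP (g : List (Int × List (String × Int))) (S : List Int) : List (Int × Int) :=
  PySem.List.sorted (S.map (pvPair g)) (fun p => p.1) true

theorem pvIns_eq_insertBy (x : Int × Int) (L : List (Int × Int)) :
    pvIns x L = PySem.List.insertBy (fun a b : Int × Int => decide (b.1 < a.1)) x L := by
  induction L with
  | nil => rfl
  | cons y ys ih =>
    simp only [pvIns, PySem.List.insertBy, ih]
    by_cases h : y.1 ≥ x.1
    · rw [if_pos h, if_neg (by simpa using not_lt.mpr h)]
    · rw [if_neg h, if_pos (by simpa using lt_of_not_ge h)]

theorem pvIns_length (x : Int × Int) (L : List (Int × Int)) :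
    (pvIns x L).length = L.length + 1 := by
  induction L with
  | nil => rfl
  | cons y ys ih => simp only [pvIns]; split_ifs <;> simp [ih]

theorem pvIns_take_of_none (x : Int × Int) :
    ∀ (L : List (Int × Int)) (n : Nat), n ≤ L.length → (∀ y ∈ L.take n, x.1 ≤ y.1) →
    (pvIns x L).take n = L.take n := by
  intro L
  induction L with
  | nil =>
    intro n hn _
    have h0 : n = 0 := Nat.le_zero.mp (by simpa using hn)
    subst h0; rfl
  | cons y ys ih =>
    intro n hn hall
    match n with
    | 0 => rfl
    | Nat.succ m =>
      have hy : x.1 ≤ y.1 := hall y (by simp)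
      simp only [pvIns, if_pos (ge_iff_le.mpr hy), List.take_succ_cons]
      rw [ih m (by simpa using hn) (fun z hz => hall z (by simp [hz]))]

theorem pvIns_take_of_mem (x : Int × Int) :
    ∀ (L : List (Int × Int)) (n : Nat), (∃ y ∈ L.take n, y.1 < x.1) →
    pvIns x (L.take n) = (pvIns x L).take (n + 1) := by
  intro L
  induction L with
  | nil => intro n h; simp at h
  | cons y ys ih =>
    intro n h
    match n with
    | 0 => simp at h
    | Nat.succ m =>
      by_cases hy : y.1 ≥ x.1
      · have h' : ∃ z ∈ ys.take m, z.1 < x.1 := by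
          obtain ⟨z, hz, hzlt⟩ := h
          simp only [List.take_succ_cons, List.mem_cons] at hz
          rcases hz with rfl | hz
          · exact absurd hzlt (by simpa using not_lt.mpr hy)
          · exact ⟨z, hz, hzlt⟩
        simp only [List.take_succ_cons, pvIns, if_pos hy]
        rw [ih m h']
      · simp only [List.take_succ_cons, pvIns, if_neg hy]

theorem pv_last_le :
    ∀ (M : List (Int × Int)), M.Pairwise (fun a b => b.1 ≤ a.1) → M ≠ [] →
    ∀ y ∈ M, (M.getLast?.getD (0, 0)).1 ≤ y.1 := by
  intro M
  induction M with
  | nil => intro _ h; exact absurd rfl h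
  | cons a M' ih =>
    intro hp _ y hy
    rcases List.pairwise_cons.mp hp with ⟨ha, hp'⟩
    match M' with
    | [] => simp at hy; subst hy; simp
    | b :: t =>
      have hlast : ((a :: b :: t).getLast?.getD (0, 0)) = ((b :: t).getLast?.getD (0, 0)) := by
        simp [List.getLast?_cons_cons]
      rw [hlast]
      rcases List.mem_cons.mp hy with rfl | hy'
      · have hmem : (b :: t).getLast (by simp) ∈ b :: t := List.getLast_mem _
        have : ((b :: t).getLast?.getD (0, 0)) = (b :: t).getLast (by simp) := by
          rw [List.getLast?_eq_getLast]; rfl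
        rw [this]
        exact ha _ hmem
      · exact ih hp' (by simp) y hy'

-- one loop iteration on a fresh id: the buffer stays the take-k prefix after insertion
theorem pv_step_buffer (q r : Int) (L : List (Int × Int)) (n : Nat)
    (hL : L.Pairwise (fun a b => b.1 ≤ a.1)) :
    (if decide (((L.take n).length : Int) < (n : Int)) ||
        (!(L.take n).isEmpty && decide (((L.take n).getLast?.getD (0, 0)).1 < q)) then
       if decide ((n : Int) < ((pvIns (q, r) (L.take n)).length : Int)) then
         (pvIns (q, r) (L.take n)).dropLast else pvIns (q, r) (L.take n)
     else L.take n) = (pvIns (q, r) L).take n := by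
  set x : Int × Int := (q, r) with hxdef
  by_cases hlen : L.length < n
  · -- buffer not full: plain insertion, no pop
    have ht : L.take n = L := List.take_of_length_le (le_of_lt hlen)
    rw [ht]
    have hc1 : ((L.length : Int) < (n : Int)) := by exact_mod_cast hlen
    rw [if_pos (by simp [hc1])]
    have hlen' : (pvIns x L).length = L.length + 1 := pvIns_length x L
    have : ¬ ((n : Int) < ((pvIns x L).length : Int)) := by
      rw [hlen']; push_cast; omega
    rw [if_neg (by simpa using this)]
    exact (List.take_of_length_le (by omega)).symm
  · push_neg at hlen
    have hbl : (L.take n).length = n := by simp [List.length_take]; omega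
    match n with
    | 0 => simp
    | Nat.succ m =>
      have hne : L.take (m + 1) ≠ [] := by
        intro h; rw [h] at hbl; simp at hbl
      have hfirst : ¬ decide ((((L.take (m+1)).length : Int)) < ((m+1 : Nat) : Int)) = true := by
        simp [hbl]
      by_cases hq : ((L.take (m+1)).getLast?.getD (0, 0)).1 < q
      · -- new element beats the buffer's last: insert, then pop
        have hlastmem : (L.take (m+1)).getLast?.getD (0, 0) ∈ L.take (m+1) := by
          match hM : L.take (m+1) with
          | [] => exact absurd hM hne
          | a :: t =>
            have : (a :: t).getLast?.getD (0, 0) = (a :: t).getLast (by simp) := by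
              rw [List.getLast?_eq_getLast]; rfl
            rw [this]; exact List.getLast_mem _
        have hmem : ∃ y ∈ L.take (m+1), y.1 < x.1 := ⟨_, hlastmem, hq⟩

        rw [if_pos (by simp [hq, hne])]
        rw [pvIns_take_of_mem x L (m+1) hmem]
        have hlen2 : (pvIns x L).length = L.length + 1 := pvIns_length x L
        have hlt : ((m+1 : Nat) : Int) < (((pvIns x L).take (m+1+1)).length : Int) := by
          have : ((pvIns x L).take (m+1+1)).length = m + 2 := by
            simp [List.length_take, hlen2]; omega
          rw [this]; push_cast; omega
        rw [if_pos (by simpa using hlt)]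
        by_cases hfull : m + 2 ≤ (pvIns x L).length
        · by_cases hstrict : m + 2 < (pvIns x L).length
          · rw [List.dropLast_take hstrict]; norm_num
          · have heq : (pvIns x L).length = m + 2 := by omega
            rw [List.take_of_length_le (by omega), List.dropLast_eq_take, heq]; norm_num
        · omega
      · -- new element does not beat the buffer's last: buffer unchanged
        have hd1 : decide ((((L.take (m+1)).length : Int)) < ((m+1 : Nat) : Int)) = false := by
          simp [hbl]
        have hd2 : decide (((L.take (m+1)).getLast?.getD (0, 0)).1 < q) = false := by
          simpa using hq
        rw [if_neg (by rw [hd1, hd2]; simp)]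
        have hpt : (L.take (m+1)).Pairwise (fun a b => b.1 ≤ a.1) :=
          hL.sublist (List.take_sublist _ _)
        refine (pvIns_take_of_none x L (m+1) hlen (fun y hy => ?_)).symm
        have hlast := pv_last_le (L.take (m+1)) hpt hne y hy
        exact le_trans (not_lt.mp hq) hlast

-- the fold invariant: seen = dedup-so-far, best = take k of the sorted decorated dedup
theorem pv_loop (g : List (Int × List (String × Int))) (k : Int) (hk : 0 ≤ k) :
    ∀ (xs : List Int) (S : PySem.Set Int),
    xs.foldl (pvStepB g k) (S, (pvSortedP g S).take k.toNat)
      = (xs.foldl PySem.Set.add S, (pvSortedP g (xs.foldl PySem.Set.add S)).take k.toNat) := by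
  intro xs
  induction xs with
  | nil => intro S; rfl
  | cons x xs ih =>
    intro S
    rw [List.foldl_cons, List.foldl_cons]
    have hstep : pvStepB g k (S, (pvSortedP g S).take k.toNat) x
        = (PySem.Set.add S x, (pvSortedP g (PySem.Set.add S x)).take k.toNat) := by
      by_cases hc : PySem.Set.contains S x = true
      · have hSS : PySem.Set.add S x = S := by unfold PySem.Set.add; rw [if_pos hc]
        rw [hSS]
        show (if PySem.Set.contains S x then _ else _) = _
        rw [if_pos hc]
      · have hadd : PySem.Set.add S x = S ++ [x] := by
          unfold PySem.Set.add; rw [if_neg hc]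
        have hsorted : pvSortedP g (S ++ [x]) = pvIns (pvQual g x, x) (pvSortedP g S) := by
          rw [pvSortedP, List.map_append, List.map_singleton,
            PySem.List.sorted_rev_eq_foldl_insertBy, List.foldl_append, List.foldl_cons,
            List.foldl_nil, ← PySem.List.sorted_rev_eq_foldl_insertBy, ← pvSortedP,
            pvIns_eq_insertBy]
          rfl
        have hkn : ((k.toNat : Nat) : Int) = k := Int.toNat_of_nonneg hk
        have hmain := pv_step_buffer (pvQual g x) x (pvSortedP g S) k.toNat
          (PySem.List.sorted_pairwise_rev _ _)
        rw [hkn] at hmain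
        rw [hadd, hsorted, ← hmain]
        simp only [pvStepB]
        rw [if_neg hc]
        split_ifs
        · exact Prod.ext hadd rfl
        · exact Prod.ext hadd rfl
        · exact Prod.ext hadd rfl
    rw [hstep]; exact ih (PySem.Set.add S x)

-- the ids in the final buffer are the first k quality-sorted distinct ids
theorem pv_chosen (g : List (Int × List (String × Int))) (k : Int) (hk : 0 ≤ k) (ri : List Int) :
    ((ri.foldl (pvStepB g k) (PySem.Set.empty, [])).2).map (fun p => p.2)
      = (PySem.List.sorted (PySem.List.dedup ri) (fun r => pvQual g r) true).take k.toNat := by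
  have h0 : (PySem.Set.empty : PySem.Set Int) = ([] : List Int) := rfl
  have hinit : ([] : List (Int × Int)) = (pvSortedP g ([] : List Int)).take k.toNat := by
    simp [pvSortedP, PySem.List.sorted]
  rw [show (((PySem.Set.empty : PySem.Set Int), ([] : List (Int × Int))))
        = (([] : List Int), (pvSortedP g ([] : List Int)).take k.toNat) by rw [← hinit]; rfl]
  rw [pv_loop g k hk ri []]
  have hded : ri.foldl PySem.Set.add [] = PySem.List.dedup ri := by
    rw [PySem.List.dedup_eq_ofList, PySem.Set.ofList_eq_foldl]
  rw [show (ri.foldl PySem.Set.add ([] : List Int)) = PySem.List.dedup ri from hded]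
  rw [pvSortedP, pv_sorted_map (PySem.List.dedup ri) (pvPair g) (fun p => p.1)]
  rw [← List.map_take, List.map_map]
  simp [pvPair, Function.comp_def]

-- A's slice equals the same take-k prefix outside D_
theorem pv_slice_neg {α : Type} (xs : List α) (m : Int) (hm : m < 0) (h : (xs.length : Int) ≤ -m) :
    PySem.List.slice xs none (some m) = [] := by
  have hc : PySem.List.clampIdx xs.length m = 0 := by
    simp only [PySem.List.clampIdx, if_pos hm]
    split_ifs with h2
    · rfl
    · omega
  simp [PySem.List.slice, hc]

theorem pv_slice_neg_ne {α : Type} (xs : List α) (m : Int) (hm : m < 0) (h : -m < (xs.length : Int)) :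
    PySem.List.slice xs none (some m) ≠ [] := by
  have hc : PySem.List.clampIdx xs.length m = ((xs.length : Int) + m).toNat := by
    simp only [PySem.List.clampIdx, if_pos hm]
    rw [if_neg (by omega)]
  intro hcon
  have hlen0 : (PySem.List.slice xs none (some m)).length
      = min ((xs.length : Int) + m).toNat xs.length := by
    simp [PySem.List.slice, hc, List.length_take]
  rw [hcon] at hlen0
  simp only [List.length_nil] at hlen0
  omega

-- ===== VERDICT (by name: the statements are the Claim_ definitions above) =====
theorem subset_hiQ_reads_spec : Claim_unchanged_subset_hiQ_reads := by
  intro g maxR ri rt _hDom hPre hnD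
  unfold subset_hiQ_reads subset_hiQ_reads_alt
  -- the A-side quality dict is the decorated ordered dedup
  have hdict :
      ri.foldl (fun d r => PySem.Dict.insert d r (pvQual g r)) (PySem.Dict.mk [])
        = PySem.Dict.mk ((PySem.List.dedup ri).map (fun s => (s, pvQual g s))) := by
    have h0 := pv_foldl_insert g ri []
    simpa [PySem.List.dedup_eq_ofList, PySem.Set.ofList_eq_foldl] using h0
  rw [hdict]
  have hsort :
      (PySem.List.sorted ((PySem.List.dedup ri).map (fun s => (s, pvQual g s))) (fun p => p.2) true).map (fun p => p.1)
        = PySem.List.sorted (PySem.List.dedup ri) (fun r => pvQual g r) true := by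
    rw [pv_sorted_map (PySem.List.dedup ri) (fun s => (s, pvQual g s)) (fun p => p.2), List.map_map]
    simp [Function.comp_def]
  -- B's selection list equals A's slice of the sorted ids
  set k : Int := if 0 < maxR then maxR else 0 with hkdef
  have hk : 0 ≤ k := by rw [hkdef]; split_ifs <;> omega
  have hchosen := pv_chosen g k hk ri
  have hslice :
      PySem.List.slice (PySem.List.sorted (PySem.List.dedup ri) (fun r => pvQual g r) true) none (some maxR)
        = (PySem.List.sorted (PySem.List.dedup ri) (fun r => pvQual g r) true).take k.toNat := by
    by_cases hpos : 0 < maxR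
    · rw [PySem.List.slice_to _ (le_of_lt hpos)]
      simp [hkdef, hpos]
    · have hk0 : k = 0 := by simp [hkdef, hpos]
      rw [hk0]
      simp only [Int.toNat_zero, List.take_zero]
      by_cases hz : maxR = 0
      · rw [hz, PySem.List.slice_to _ le_rfl]; simp
      · have hneg : maxR < 0 := by omega
        have hlen : ((PySem.List.sorted (PySem.List.dedup ri) (fun r => pvQual g r) true).length : Int) ≤ -maxR := by
          rw [PySem.List.length_sorted]
          have : ¬ (maxR < 0 ∧ -maxR < ((PySem.Set.ofList ri).length : Int)) := by
            intro h; exact hnD h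
          rw [PySem.List.dedup_eq_ofList]
          omega
        exact pv_slice_neg _ maxR hneg hlen
  show (_, _) = (_, _)
  rw [show (PySem.Dict.mk ((PySem.List.dedup ri).map (fun s => (s, pvQual g s)))).items
        = (PySem.List.dedup ri).map (fun s => (s, pvQual g s)) from rfl]
  rw [hsort, hslice, ← hchosen]
  -- now both sides select the same id list; compare the two components
  refine Prod.ext rfl ?_
  have htags := pv_tags
    (fun x => PySem.Set.contains (PySem.Set.ofList
      (((ri.foldl (pvStepB g k) (PySem.Set.empty, [])).2).map (fun p => p.2))) x)
    ri rt 0 (by simpa using hPre.2)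
  simp only [Nat.cast_zero, List.drop_zero] at htags
  simp only [List.map_map, Function.comp_def]
  exact htags

theorem subset_hiQ_reads_changed : Claim_changed_subset_hiQ_reads := by
  unfold Claim_changed_subset_hiQ_reads; decide

theorem subset_hiQ_reads_tight : Claim_exact_subset_hiQ_reads := by
  intro g maxR ri rt _hDom _hPre hD heq
  obtain ⟨hneg, hlen⟩ := hD
  -- B's buffer cap is 0, so B selects nothing
  have hk0 : (if 0 < maxR then maxR else 0) = 0 := by rw [if_neg (by omega)]
  have hchosen := pv_chosen g (if 0 < maxR then maxR else 0) (by omega) ri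
  rw [hk0] at hchosen
  simp only [Int.toNat_zero, List.take_zero] at hchosen
  have hB1 : (subset_hiQ_reads_alt g maxR ri rt).1 = [] := by
    show PySem.List.sorted (PySem.Set.ofList
        (((ri.foldl (pvStepB g (if 0 < maxR then maxR else 0)) (PySem.Set.empty, [])).2).map
          (fun p => p.2))) (fun x => x) false = []
    rw [hk0, hchosen]
    rfl
  -- A's slice is nonempty, so A selects at least one read
  have hA1 : (subset_hiQ_reads g maxR ri rt).1 ≠ [] := by
    unfold subset_hiQ_reads
    intro hcon
    rw [PySem.List.sorted_eq_nil_iff] at hcon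
    have hsl : PySem.List.slice
        ((PySem.List.sorted
          ((ri.foldl (fun d r => PySem.Dict.insert d r (pvQual g r)) (PySem.Dict.mk [])).items)
          (fun p => p.2) true).map (fun p => p.1)) none (some maxR) ≠ [] := by
      apply pv_slice_neg_ne _ maxR hneg
      have hdict :
          ri.foldl (fun d r => PySem.Dict.insert d r (pvQual g r)) (PySem.Dict.mk [])
            = PySem.Dict.mk ((PySem.List.dedup ri).map (fun s => (s, pvQual g s))) := by
        have h0 := pv_foldl_insert g ri []
        simpa [PySem.List.dedup_eq_ofList, PySem.Set.ofList_eq_foldl] using h0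
      rw [hdict]
      rw [show (PySem.Dict.mk ((PySem.List.dedup ri).map (fun s => (s, pvQual g s)))).items
            = (PySem.List.dedup ri).map (fun s => (s, pvQual g s)) from rfl]
      simp only [List.length_map, PySem.List.length_sorted]
      rw [PySem.List.dedup_eq_ofList]
      omega
    match hm : PySem.List.slice
        ((PySem.List.sorted
          ((ri.foldl (fun d r => PySem.Dict.insert d r (pvQual g r)) (PySem.Dict.mk [])).items)
          (fun p => p.2) true).map (fun p => p.1)) none (some maxR) with
    | [] => exact hsl hm
    | a :: t =>
      have : a ∈ PySem.Set.ofList (a :: t) := (PySem.Set.mem_ofList _ _).mpr (by simp)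
      rw [← hm] at this
      rw [hcon] at this
      simp at this
  exact hA1 (by rw [heq, hB1])
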